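-- pv_equiv track=rewrite | github.com/lucianoscarpaci/Technical-Interview-Prep | Unit11/PartB/p4.py | escape_subzones
-- ===== SOURCE A (Python) =====
-- def next_moves(position, safety, visited):
--     row, col = position
--     rows, cols = len(safety), len(safety[0])
--
--     directions = [(-1, 0), (1, 0), (0, -1), (0, 1)]  # Up, Down, Left, Right
--     valid_moves = []
--
--     for d_row, d_col in directions:
--         new_row, new_col = row + d_row, col + d_col
--         if 0 <= new_row < rows and 0 <= new_col < cols:
--             # Check if the next zone is less or equally safe
--             if (
--                 safety[new_row][new_col] >= safety[row][col]
--                 and (new_row, new_col) not in visited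
--             ):
--                 valid_moves.append((new_row, new_col))
--
--     return valid_moves
--
-- def dfs(row, col, safety, visited):
--     stack = [(row, col)]
--     visited.add((row, col))
--
--     while stack:
--         current_row, current_col = stack.pop()
--         for next_row, next_col in next_moves(
--             (current_row, current_col), safety, visited
--         ):
--             if (next_row, next_col) not in visited:
--                 visited.add((next_row, next_col))
--                 stack.append((next_row, next_col))
--
-- def escape_subzones(safety):
--     m, n = len(safety), len(safety[0])
--
--     # sets to track visited zones
--     left_reachable = set()
--     right_reachable = set()
--
--     for r in range(m):
--         dfs(r, 0, safety, left_reachable)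
--         dfs(r, n - 1, safety, right_reachable)
--
--     for c in range(n):
--         dfs(0, c, safety, left_reachable)
--         dfs(m - 1, c, safety, right_reachable)
--
--     # check zones that can reach both sides
--     result = []
--     for r in range(m):
--         for c in range(n):
--             if (r, c) in left_reachable and (r, c) in right_reachable:
--                 result.append((r, c))
--     return result
-- ===== SOURCE B (Python) =====
-- def escape_subzones(safety):
--     m, n = len(safety), len(safety[0])
--
--     def flood(seeds):
--         # multi-source BFS by levels instead of per-seed stack DFS
--         reach = set(seeds)
--         frontier = list(seeds)
--         while frontier:
--             nxt = []
--             for r, c in frontier: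
--                 for nr, nc in ((r - 1, c), (r + 1, c), (r, c - 1), (r, c + 1)):
--                     if 0 <= nr < m and 0 <= nc < n and (nr, nc) not in reach \
--                             and safety[nr][nc] >= safety[r][c]:
--                         reach.add((nr, nc))
--                         nxt.append((nr, nc))
--             frontier = nxt
--         return reach
--
--     left = flood([(r, 0) for r in range(m)] + [(0, c) for c in range(n)])
--     right = flood([(r, n - 1) for r in range(m)] + [(m - 1, c) for c in range(n)])
--     return [(r, c) for r in range(m) for c in range(n)
--             if (r, c) in left and (r, c) in right]
-- ===== Notes on version B (the rewrite author's own statement) =====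
-- stated objective: alternative
-- what changed: A runs a separate stack-based DFS from every border cell into two shared visited sets; B runs one multi-source level-by-level BFS flood per side seeded with all border cells at once, then emits the row-major intersection.
import Mathlib
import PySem

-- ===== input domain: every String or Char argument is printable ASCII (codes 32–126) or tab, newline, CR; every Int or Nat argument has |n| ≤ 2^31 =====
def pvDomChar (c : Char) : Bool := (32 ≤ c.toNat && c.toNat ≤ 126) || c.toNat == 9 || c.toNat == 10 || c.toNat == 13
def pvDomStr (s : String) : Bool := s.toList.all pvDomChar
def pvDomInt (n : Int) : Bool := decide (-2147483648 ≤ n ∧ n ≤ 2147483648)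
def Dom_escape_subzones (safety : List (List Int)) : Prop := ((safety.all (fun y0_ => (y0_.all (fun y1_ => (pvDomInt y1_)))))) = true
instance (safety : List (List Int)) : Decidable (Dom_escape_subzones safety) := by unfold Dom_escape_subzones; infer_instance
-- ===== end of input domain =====

-- B replaces A's per-border-cell stack DFS into shared visited sets by one multi-source
-- level-by-level BFS flood per side; same return value (alternative decomposition).

-- shared helpers: both Pythons index the grid and bound-check identically
def pvDirs : List (Int × Int) := [(-1, 0), (1, 0), (0, -1), (0, 1)]  -- Up, Down, Left, Right

-- safety[r][c]; every evaluation that influences a result has 0 ≤ r < len(safety), 0 ≤ c < len(safety[0])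
def pvAt (safety : List (List Int)) (r c : Int) : Int :=
  (PySem.List.pyGet? ((PySem.List.pyGet? safety r).getD []) c).getD 0

-- 0 <= q.1 < m and 0 <= q.2 < n
def pvInb (m n : Nat) (q : Int × Int) : Bool :=
  decide (0 ≤ q.1 ∧ q.1 < (m : Int) ∧ 0 ≤ q.2 ∧ q.2 < (n : Int))

-- ===== PORT A =====
def next_moves (position : Int × Int) (safety : List (List Int))
    (visited : PySem.Set (Int × Int)) : List (Int × Int) :=
  pvDirs.foldl (fun valid_moves d =>
    if pvInb safety.length (safety.headD []).length (position.1 + d.1, position.2 + d.2)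
        && decide (pvAt safety (position.1 + d.1) (position.2 + d.2)
            ≥ pvAt safety position.1 position.2)
        && !(PySem.Set.contains visited (position.1 + d.1, position.2 + d.2))
    then valid_moves ++ [(position.1 + d.1, position.2 + d.2)] else valid_moves) []

-- the while-stack loop of dfs; the fuel m*n+1 passed by dfs provably suffices (dfsLoop_big below)
def dfsLoop (safety : List (List Int)) :
    Nat → List (Int × Int) → PySem.Set (Int × Int) → PySem.Set (Int × Int)
  | 0, _, visited => visited
  | fuel + 1, stack, visited =>
    if stack.isEmpty then visited
    else
      -- Python's stack.pop() removes the LAST element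
      let vs := (next_moves (stack.getLastD (0, 0)) safety visited).foldl
        (fun (vs : PySem.Set (Int × Int) × List (Int × Int)) q =>
          if PySem.Set.contains vs.1 q then vs
          else (PySem.Set.add vs.1 q, vs.2 ++ [q]))
        (visited, stack.dropLast)
      dfsLoop safety fuel vs.2 vs.1

def dfs (row col : Int) (safety : List (List Int)) (visited : PySem.Set (Int × Int)) :
    PySem.Set (Int × Int) :=
  dfsLoop safety (safety.length * (safety.headD []).length + 1)
    [(row, col)] (PySem.Set.add visited (row, col))

def escape_subzones (safety : List (List Int)) : List (Int × Int) :=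
  let m := safety.length
  let n := (safety.headD []).length
  let lr := (PySem.List.pyRange 0 (m : Int)).foldl
    (fun (lr : PySem.Set (Int × Int) × PySem.Set (Int × Int)) r =>
      (dfs r 0 safety lr.1, dfs r ((n : Int) - 1) safety lr.2))
    (PySem.Set.empty, PySem.Set.empty)
  let lr2 := (PySem.List.pyRange 0 (n : Int)).foldl
    (fun (lr : PySem.Set (Int × Int) × PySem.Set (Int × Int)) c =>
      (dfs 0 c safety lr.1, dfs ((m : Int) - 1) c safety lr.2)) lr
  (PySem.List.pyRange 0 (m : Int)).foldl (fun result r =>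
    (PySem.List.pyRange 0 (n : Int)).foldl (fun result c =>
      if PySem.Set.contains lr2.1 (r, c) && PySem.Set.contains lr2.2 (r, c)
      then result ++ [(r, c)] else result) result) []

-- ===== PORT B =====
def pvNbrs (p : Int × Int) : List (Int × Int) :=
  [(p.1 - 1, p.2), (p.1 + 1, p.2), (p.1, p.2 - 1), (p.1, p.2 + 1)]

-- the 'while frontier' loop of flood; the fuel m*n+len(seeds) provably suffices (bfsLoop_big below)
def bfsLoop (safety : List (List Int)) (m n : Nat) :
    Nat → PySem.Set (Int × Int) → List (Int × Int) → PySem.Set (Int × Int)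
  | _, reach, [] => reach
  | 0, reach, _ => reach
  | fuel + 1, reach, frontier =>
    let rn := frontier.foldl (fun (rn : PySem.Set (Int × Int) × List (Int × Int)) p =>
      (pvNbrs p).foldl (fun (rn : PySem.Set (Int × Int) × List (Int × Int)) q =>
        if pvInb m n q && !(PySem.Set.contains rn.1 q)
            && decide (pvAt safety q.1 q.2 ≥ pvAt safety p.1 p.2)
        then (PySem.Set.add rn.1 q, rn.2 ++ [q]) else rn) rn)
      (reach, ([] : List (Int × Int)))
    bfsLoop safety m n fuel rn.1 rn.2

def flood (safety : List (List Int)) (m n : Nat) (seeds : List (Int × Int)) :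
    PySem.Set (Int × Int) :=
  bfsLoop safety m n (m * n + seeds.length) (PySem.Set.ofList seeds) seeds

def escape_subzones_alt (safety : List (List Int)) : List (Int × Int) :=
  let m := safety.length
  let n := (safety.headD []).length
  let left := flood safety m n
    ((PySem.List.pyRange 0 (m : Int)).map (fun r => (r, (0 : Int))) ++
     (PySem.List.pyRange 0 (n : Int)).map (fun c => ((0 : Int), c)))
  let right := flood safety m n
    ((PySem.List.pyRange 0 (m : Int)).map (fun r => (r, (n : Int) - 1)) ++
     (PySem.List.pyRange 0 (n : Int)).map (fun c => ((m : Int) - 1, c)))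
  (PySem.List.pyRange 0 (m : Int)).flatMap (fun r =>
    ((PySem.List.pyRange 0 (n : Int)).filter (fun c =>
      PySem.Set.contains left (r, c) && PySem.Set.contains right (r, c))).map (fun c => (r, c)))

-- ===== PRECONDITION & SPEC =====
-- Pre_ excludes exactly the inputs on which the Python A raises IndexError: the empty list,
-- and grids with some row shorter than row 0 (the border DFS evaluates safety[i][n-1] on
-- that short row i and raises). Rows longer than row 0 are admitted.
def Pre_escape_subzones (safety : List (List Int)) : Prop :=
  safety ≠ [] ∧ ∀ row ∈ safety, (safety.headD []).length ≤ row.length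
instance (safety : List (List Int)) : Decidable (Pre_escape_subzones safety) := by
  unfold Pre_escape_subzones; infer_instance

def pvWitness_escape_subzones : List (List Int) := [[1, 2], [3, 4]]

def Spec_escape_subzones (safety : List (List Int)) (out : List (Int × Int)) : Prop := out = escape_subzones_alt safety
instance (safety : List (List Int)) (out : List (Int × Int)) : Decidable (Spec_escape_subzones safety out) := by unfold Spec_escape_subzones; infer_instance

-- ===== CLAIM (what is proved, stated in full; the proofs are below) =====
def Claim_equal_escape_subzones : Prop := ∀ (safety : List (List Int)), Dom_escape_subzones safety → Pre_escape_subzones safety → Spec_escape_subzones safety (escape_subzones safety)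

-- ===== LEMMAS AND PROOFS =====

-- all grid cells, as Int pairs
def pvGrid (m n : Nat) : List (Int × Int) :=
  (List.range m).flatMap (fun (r : Nat) => (List.range n).map (fun (c : Nat) => ((r : Int), (c : Int))))

lemma mem_pvGrid {m n : Nat} {q : Int × Int} : q ∈ pvGrid m n ↔ pvInb m n q = true := by
  obtain ⟨a, b⟩ := q
  rw [pvGrid, List.mem_flatMap]
  rw [show (pvInb m n (a, b) = true) ↔ (0 ≤ a ∧ a < (m:Int) ∧ 0 ≤ b ∧ b < (n:Int)) by
    simp [pvInb]]
  constructor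
  · rintro ⟨r, hr, h⟩
    rw [List.mem_map] at h
    obtain ⟨c, hc, h⟩ := h
    rw [List.mem_range] at hr
    rw [List.mem_range] at hc
    injection h with h1 h2
    omega
  · rintro ⟨h1, h2, h3, h4⟩
    refine ⟨a.toNat, List.mem_range.mpr (by omega), ?_⟩
    rw [List.mem_map]
    refine ⟨b.toNat, List.mem_range.mpr (by omega), ?_⟩
    rw [Prod.mk.injEq]
    exact ⟨by omega, by omega⟩

lemma length_pvGrid (m n : Nat) : (pvGrid m n).length = m * n := by
  simp [pvGrid, List.length_flatMap]

-- number of grid cells not yet in the set: the termination potential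
def pvUc (m n : Nat) (v : PySem.Set (Int × Int)) : Nat :=
  ((pvGrid m n).filter (fun p => !PySem.Set.contains v p)).length

lemma pvContains_eq_decide (s : PySem.Set (Int × Int)) (x : Int × Int) :
    PySem.Set.contains s x = decide (x ∈ s) := by
  by_cases h : x ∈ s <;> simp [h]

lemma pvUc_le (m n : Nat) (v : PySem.Set (Int × Int)) : pvUc m n v ≤ m * n :=
  le_trans (List.length_filter_le _ _) (le_of_eq (length_pvGrid m n))

lemma countP_lt_of_strict {α : Type} (l : List α) (p q : α → Bool)
    (h : ∀ a ∈ l, p a = true → q a = true) (a0 : α) (ha0 : a0 ∈ l)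
    (hq : q a0 = true) (hp : p a0 = false) : l.countP p < l.countP q := by
  induction l with
  | nil => cases ha0
  | cons x xs ih =>
    have hmono : xs.countP p ≤ xs.countP q :=
      List.countP_mono_left (fun a ha => h a (List.mem_cons_of_mem _ ha))
    rw [List.countP_cons, List.countP_cons]
    rcases List.mem_cons.mp ha0 with rfl | hmem
    · simp [hq, hp]
      omega
    · have hstrict := ih (fun a ha hpa => h a (List.mem_cons_of_mem _ ha) hpa) hmem
      have hx : p x = true → q x = true := h x (List.mem_cons_self ..)
      by_cases hpx : p x = true
      · simp [hpx, hx hpx]; omega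
      · simp only [Bool.not_eq_true] at hpx
        simp [hpx]
        split <;> omega

lemma pvUc_add_lt (m n : Nat) (v : PySem.Set (Int × Int)) (x : Int × Int)
    (hx : pvInb m n x = true) (hnot : x ∉ v) :
    pvUc m n (PySem.Set.add v x) < pvUc m n v := by
  simp only [pvUc, ← List.countP_eq_length_filter]
  refine countP_lt_of_strict _ _ _ (fun a _ hpa => ?_) x (mem_pvGrid.mpr hx) ?_ ?_
  · simp only [pvContains_eq_decide, Bool.not_eq_eq_eq_not, Bool.not_true,
      decide_eq_false_iff_not, PySem.Set.mem_add] at hpa ⊢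
    exact fun hav => hpa (Or.inl hav)
  · simp [hnot]
  · simp [PySem.Set.mem_add]

-- one legal move of either Python: q is a 4-neighbour of p, in bounds, at least as safe
def pvEdge (safety : List (List Int)) (m n : Nat) (p q : Int × Int) : Prop :=
  q ∈ pvNbrs p ∧ pvInb m n q = true ∧ pvAt safety q.1 q.2 ≥ pvAt safety p.1 p.2

-- reachable from a seed list by legal moves: the set both programs compute
inductive pvReach (safety : List (List Int)) (m n : Nat) (S : List (Int × Int)) :
    Int × Int → Prop
  | seed {p : Int × Int} (h : p ∈ S) : pvReach safety m n S p
  | step {p q : Int × Int} (hp : pvReach safety m n S p)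
      (hq : pvEdge safety m n p q) : pvReach safety m n S q

lemma pvReach_nil {safety : List (List Int)} {m n : Nat} {p : Int × Int}
    (h : pvReach safety m n [] p) : False := by
  induction h with
  | seed h => cases h
  | step _ _ ih => exact ih

lemma pvReach_mono {safety : List (List Int)} {m n : Nat} {S T : List (Int × Int)}
    (hST : ∀ x ∈ S, x ∈ T) {p : Int × Int} (h : pvReach safety m n S p) :
    pvReach safety m n T p := by
  induction h with
  | seed h => exact pvReach.seed (hST _ h)
  | step _ hq ih => exact pvReach.step ih hq

lemma pvReach_min {safety : List (List Int)} {m n : Nat} {S : List (Int × Int)}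
    {V : PySem.Set (Int × Int)} (hS : ∀ x ∈ S, x ∈ V)
    (hC : ∀ p ∈ V, ∀ q, pvEdge safety m n p q → q ∈ V)
    {p : Int × Int} (h : pvReach safety m n S p) : p ∈ V := by
  induction h with
  | seed h => exact hS _ h
  | step _ hq ih => exact hC _ ih _ hq

lemma mem_pvNbrs {p q : Int × Int} :
    q ∈ pvNbrs p ↔ ∃ d ∈ pvDirs, (p.1 + d.1, p.2 + d.2) = q := by
  obtain ⟨a, b⟩ := q
  constructor
  · intro h
    rcases List.mem_cons.mp h with h | h
    · exact ⟨(-1, 0), by simp [pvDirs], by rw [h, Prod.mk.injEq]; exact ⟨by omega, by omega⟩⟩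
    rcases List.mem_cons.mp h with h | h
    · exact ⟨(1, 0), by simp [pvDirs], by rw [h, Prod.mk.injEq]; exact ⟨by omega, by omega⟩⟩
    rcases List.mem_cons.mp h with h | h
    · exact ⟨(0, -1), by simp [pvDirs], by rw [h, Prod.mk.injEq]; exact ⟨by omega, by omega⟩⟩
    rcases List.mem_cons.mp h with h | h
    · exact ⟨(0, 1), by simp [pvDirs], by rw [h, Prod.mk.injEq]; exact ⟨by omega, by omega⟩⟩
    · cases h
  · rintro ⟨⟨d1, d2⟩, hd, h⟩
    rw [← h]
    rw [pvNbrs]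
    have hd' : (d1 = -1 ∧ d2 = 0) ∨ (d1 = 1 ∧ d2 = 0) ∨ (d1 = 0 ∧ d2 = -1) ∨ (d1 = 0 ∧ d2 = 1) := by
      rcases List.mem_cons.mp hd with h' | h'
      · exact Or.inl (by injection h' with x y; exact ⟨x, y⟩)
      rcases List.mem_cons.mp h' with h' | h'
      · exact Or.inr (Or.inl (by injection h' with x y; exact ⟨x, y⟩))
      rcases List.mem_cons.mp h' with h' | h'
      · exact Or.inr (Or.inr (Or.inl (by injection h' with x y; exact ⟨x, y⟩)))
      rcases List.mem_cons.mp h' with h' | h'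
      · exact Or.inr (Or.inr (Or.inr (by injection h' with x y; exact ⟨x, y⟩)))
      · cases h'
    rcases hd' with ⟨rfl, rfl⟩ | ⟨rfl, rfl⟩ | ⟨rfl, rfl⟩ | ⟨rfl, rfl⟩ <;>
      simp [List.mem_cons, Prod.mk.injEq] <;> omega

lemma mem_next_moves {safety : List (List Int)} {v : PySem.Set (Int × Int)}
    {p q : Int × Int} :
    q ∈ next_moves p safety v ↔
      pvEdge safety safety.length (safety.headD []).length p q ∧ q ∉ v := by
  unfold next_moves
  rw [PySem.List.foldl_append_if]
  simp only [List.nil_append, List.mem_map, List.mem_filter, Bool.and_eq_true,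
    Bool.not_eq_eq_eq_not, Bool.not_true, decide_eq_true_eq, pvContains_eq_decide,
    decide_eq_false_iff_not]
  constructor
  · rintro ⟨d, ⟨hd, ⟨hinb, hge⟩, hnv⟩, rfl⟩
    exact ⟨⟨mem_pvNbrs.mpr ⟨d, hd, rfl⟩, hinb, hge⟩, hnv⟩
  · rintro ⟨⟨hnb, hinb, hge⟩, hnv⟩
    obtain ⟨d, hd, hfd⟩ := mem_pvNbrs.mp hnb
    subst hfd
    exact ⟨d, ⟨hd, ⟨hinb, hge⟩, hnv⟩, rfl⟩

-- the inner fold of dfsLoop, named for the proofs (the port's lambda is definitionally this)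
def pvPushA (vs : PySem.Set (Int × Int) × List (Int × Int)) (q : Int × Int) :
    PySem.Set (Int × Int) × List (Int × Int) :=
  if PySem.Set.contains vs.1 q then vs else (PySem.Set.add vs.1 q, vs.2 ++ [q])

lemma foldA_spec (m n : Nat) (L : List (Int × Int)) :
    ∀ (v : PySem.Set (Int × Int)) (s : List (Int × Int)),
    (∀ q ∈ L, pvInb m n q = true) →
    (∀ p ∈ v, p ∈ (L.foldl pvPushA (v, s)).1) ∧
    (∀ p ∈ L, p ∈ (L.foldl pvPushA (v, s)).1) ∧
    (∀ p ∈ s, p ∈ (L.foldl pvPushA (v, s)).2) ∧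
    (∀ p ∈ (L.foldl pvPushA (v, s)).1, p ∈ v ∨ p ∈ (L.foldl pvPushA (v, s)).2) ∧
    (∀ p ∈ (L.foldl pvPushA (v, s)).2, p ∈ s ∨ p ∈ L) ∧
    (∀ p ∈ L, p ∈ v ∨ p ∈ (L.foldl pvPushA (v, s)).2) ∧
    (∀ p ∈ (L.foldl pvPushA (v, s)).2, p ∈ s ∨ p ∈ (L.foldl pvPushA (v, s)).1) ∧
    pvUc m n (L.foldl pvPushA (v, s)).1 + (L.foldl pvPushA (v, s)).2.length
      ≤ pvUc m n v + s.length := by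
  induction L with
  | nil =>
    intro v s _
    simp only [List.foldl_nil]
    refine ⟨fun p hp => hp, ?_, fun p hp => hp, fun p hp => Or.inl hp,
      fun p hp => Or.inl hp, ?_, fun p hp => Or.inl hp, le_refl _⟩
    · intro p hp; cases hp
    · intro p hp; cases hp
  | cons q0 L ih =>
    intro v s hL
    rw [List.foldl_cons]
    by_cases hc : q0 ∈ v
    · rw [show pvPushA (v, s) q0 = (v, s) from by simp [pvPushA, hc]]
      obtain ⟨i1, i2, i3, i4, i5, i6, i7, i8⟩ := ih v s (fun q hq => hL q (List.mem_cons_of_mem _ hq))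
      have hq0v : q0 ∈ v := hc
      refine ⟨i1, ?_, i3, i4, ?_, ?_, i7, i8⟩
      · intro p hp
        rcases List.mem_cons.mp hp with rfl | hp
        · exact i1 _ hq0v
        · exact i2 _ hp
      · intro p hp
        rcases i5 p hp with h | h
        · exact Or.inl h
        · exact Or.inr (List.mem_cons_of_mem _ h)
      · intro p hp
        rcases List.mem_cons.mp hp with rfl | hp
        · exact Or.inl hq0v
        · exact i6 _ hp
    · rw [show pvPushA (v, s) q0 = (PySem.Set.add v q0, s ++ [q0]) from by simp [pvPushA, hc]]
      obtain ⟨i1, i2, i3, i4, i5, i6, i7, i8⟩ :=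
        ih (PySem.Set.add v q0) (s ++ [q0]) (fun q hq => hL q (List.mem_cons_of_mem _ hq))
      have hq0 : q0 ∉ v := hc
      have hmem_add : ∀ p ∈ v, p ∈ PySem.Set.add v q0 :=
        fun p hp => (PySem.Set.mem_add v q0 p).mpr (Or.inl hp)
      have hq0_add : q0 ∈ PySem.Set.add v q0 := (PySem.Set.mem_add v q0 q0).mpr (Or.inr rfl)
      have hq0_s : q0 ∈ s ++ [q0] := List.mem_append_right _ (List.mem_singleton.mpr rfl)
      refine ⟨fun p hp => i1 _ (hmem_add _ hp), ?_, fun p hp => i3 _ (List.mem_append_left _ hp),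
        ?_, ?_, ?_, ?_, ?_⟩
      · intro p hp
        rcases List.mem_cons.mp hp with rfl | hp
        · exact i1 _ hq0_add
        · exact i2 _ hp
      · intro p hp
        rcases i4 p hp with h | h
        · rcases (PySem.Set.mem_add v q0 p).mp h with h' | rfl
          · exact Or.inl h'
          · exact Or.inr (i3 _ hq0_s)
        · exact Or.inr h
      · intro p hp
        rcases i5 p hp with h | h
        · rcases List.mem_append.mp h with h' | h'
          · exact Or.inl h'
          · exact Or.inr (List.mem_cons.mpr (Or.inl (List.mem_singleton.mp h')))
        · exact Or.inr (List.mem_cons_of_mem _ h)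
      · intro p hp
        rcases List.mem_cons.mp hp with rfl | hp
        · exact Or.inr (i3 _ hq0_s)
        · rcases i6 _ hp with h | h
          · rcases (PySem.Set.mem_add v q0 p).mp h with h' | rfl
            · exact Or.inl h'
            · exact Or.inr (i3 _ hq0_s)
          · exact Or.inr h
      · intro p hp
        rcases i7 p hp with h | h
        · rcases List.mem_append.mp h with h' | h'
          · exact Or.inl h'
          · exact Or.inr (i1 p (by rw [List.mem_singleton.mp h']; exact hq0_add))
        · exact Or.inr h
      · have hlt : pvUc m n (PySem.Set.add v q0) < pvUc m n v :=
          pvUc_add_lt m n v q0 (hL q0 (List.mem_cons_self ..)) hq0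
        have := i8
        simp only [List.length_append, List.length_singleton] at this ⊢
        omega

-- unfolding equations for the fuelled loops
lemma dfsLoop_zero (safety : List (List Int)) (stack : List (Int × Int))
    (visited : PySem.Set (Int × Int)) : dfsLoop safety 0 stack visited = visited := rfl

lemma dfsLoop_nil (safety : List (List Int)) (f : Nat) (visited : PySem.Set (Int × Int)) :
    dfsLoop safety (f + 1) [] visited = visited := rfl

lemma dfsLoop_cons (safety : List (List Int)) (f : Nat) (stack : List (Int × Int))
    (visited : PySem.Set (Int × Int)) (h : stack ≠ []) :
    dfsLoop safety (f + 1) stack visited =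
      dfsLoop safety f
        ((next_moves (stack.getLastD (0, 0)) safety visited).foldl pvPushA
          (visited, stack.dropLast)).2
        ((next_moves (stack.getLastD (0, 0)) safety visited).foldl pvPushA
          (visited, stack.dropLast)).1 := by
  conv_lhs => rw [dfsLoop]
  rw [if_neg (by simpa [List.isEmpty_iff] using h)]
  rfl

lemma stack_split {α : Type} (l : List α) (d : α) (h : l ≠ []) :
    l = l.dropLast ++ [l.getLastD d] := by
  have hD : l.getLastD d = l.getLast h := by
    rw [List.getLastD_eq_getLast?, List.getLast?_eq_some_getLast h]
    rfl
  rw [hD]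
  exact (List.dropLast_append_getLast h).symm

lemma dfsLoop_sound (safety : List (List Int)) (S : List (Int × Int)) :
    ∀ (fuel : Nat) (stack : List (Int × Int)) (visited : PySem.Set (Int × Int)),
      (∀ p ∈ visited, pvReach safety safety.length (safety.headD []).length S p) →
      (∀ p ∈ stack, pvReach safety safety.length (safety.headD []).length S p) →
      ∀ p ∈ dfsLoop safety fuel stack visited,
        pvReach safety safety.length (safety.headD []).length S p := by
  intro fuel
  induction fuel with
  | zero => intro stack visited hv _ p hp; exact hv p hp
  | succ f ih =>
    intro stack visited hv hs p hp
    by_cases hst : stack = []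
    · subst hst; rw [dfsLoop_nil] at hp; exact hv p hp
    · rw [dfsLoop_cons safety f stack visited hst] at hp
      have hL : ∀ q ∈ next_moves (stack.getLastD (0, 0)) safety visited,
          pvInb safety.length (safety.headD []).length q = true :=
        fun q hq => (mem_next_moves.mp hq).1.2.1
      obtain ⟨i1, i2, i3, i4, i5, i6, i7, i8⟩ :=
        foldA_spec safety.length (safety.headD []).length
          (next_moves (stack.getLastD (0, 0)) safety visited) visited stack.dropLast hL
      have hcur : pvReach safety safety.length (safety.headD []).length S
          (stack.getLastD (0, 0)) := by
        apply hs
        have hmem : stack.getLastD (0, 0) ∈ stack.dropLast ++ [stack.getLastD (0, 0)] :=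
          List.mem_append_right _ (List.mem_singleton.mpr rfl)
        rw [← stack_split stack (0, 0) hst] at hmem
        exact hmem
      have hstack' : ∀ z ∈ ((next_moves (stack.getLastD (0, 0)) safety visited).foldl pvPushA
          (visited, stack.dropLast)).2,
          pvReach safety safety.length (safety.headD []).length S z := by
        intro z hz
        rcases i5 z hz with h | h
        · apply hs
          have hmem : z ∈ stack.dropLast ++ [stack.getLastD (0, 0)] := List.mem_append_left _ h
          rw [← stack_split stack (0, 0) hst] at hmem
          exact hmem
        · exact pvReach.step hcur (mem_next_moves.mp h).1
      have hv' : ∀ z ∈ ((next_moves (stack.getLastD (0, 0)) safety visited).foldl pvPushA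
          (visited, stack.dropLast)).1,
          pvReach safety safety.length (safety.headD []).length S z := by
        intro z hz
        rcases i4 z hz with h | h
        · exact hv _ h
        · exact hstack' _ h
      exact ih _ _ hv' hstack' p hp

lemma dfsLoop_big (safety : List (List Int)) :
    ∀ (fuel : Nat) (stack : List (Int × Int)) (visited : PySem.Set (Int × Int)),
      pvUc safety.length (safety.headD []).length visited + stack.length ≤ fuel →
      (∀ p ∈ stack, p ∈ visited) →
      (∀ p ∈ visited, p ∈ stack ∨ ∀ q,
        pvEdge safety safety.length (safety.headD []).length p q → q ∈ visited) →
      (∀ p ∈ visited, p ∈ dfsLoop safety fuel stack visited) ∧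
      (∀ p ∈ dfsLoop safety fuel stack visited, ∀ q,
        pvEdge safety safety.length (safety.headD []).length p q →
          q ∈ dfsLoop safety fuel stack visited) := by
  intro fuel
  induction fuel with
  | zero =>
    intro stack visited hfuel _ hinv
    have hst : stack = [] := by
      cases stack with
      | nil => rfl
      | cons a t => simp only [List.length_cons] at hfuel; omega
    subst hst
    rw [dfsLoop_zero]
    refine ⟨fun p hp => hp, fun p hp q hq => ?_⟩
    rcases hinv p hp with h | h
    · cases h
    · exact h q hq
  | succ f ih =>
    intro stack visited hfuel hsv hinv
    by_cases hst : stack = []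
    · subst hst
      rw [dfsLoop_nil]
      refine ⟨fun p hp => hp, fun p hp q hq => ?_⟩
      rcases hinv p hp with h | h
      · cases h
      · exact h q hq
    · rw [dfsLoop_cons safety f stack visited hst]
      have hL : ∀ q ∈ next_moves (stack.getLastD (0, 0)) safety visited,
          pvInb safety.length (safety.headD []).length q = true :=
        fun q hq => (mem_next_moves.mp hq).1.2.1
      obtain ⟨i1, i2, i3, i4, i5, i6, i7, i8⟩ :=
        foldA_spec safety.length (safety.headD []).length
          (next_moves (stack.getLastD (0, 0)) safety visited) visited stack.dropLast hL
      have hlen : stack.dropLast.length + 1 = stack.length := by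
        rw [List.length_dropLast]
        cases stack with
        | nil => exact absurd rfl hst
        | cons a t => simp
      have hmemstack : ∀ p ∈ stack, p ∈ stack.dropLast ∨ p = stack.getLastD (0, 0) := by
        intro p hp
        rw [stack_split stack (0, 0) hst] at hp
        rcases List.mem_append.mp hp with h | h
        · exact Or.inl h
        · exact Or.inr (List.mem_singleton.mp h)
      have hfuel' : pvUc safety.length (safety.headD []).length
          ((next_moves (stack.getLastD (0, 0)) safety visited).foldl pvPushA
            (visited, stack.dropLast)).1 +
          ((next_moves (stack.getLastD (0, 0)) safety visited).foldl pvPushA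
            (visited, stack.dropLast)).2.length ≤ f := by
        omega
      have hsv' : ∀ p ∈ ((next_moves (stack.getLastD (0, 0)) safety visited).foldl pvPushA
          (visited, stack.dropLast)).2,
          p ∈ ((next_moves (stack.getLastD (0, 0)) safety visited).foldl pvPushA
            (visited, stack.dropLast)).1 := by
        intro p hp
        rcases i7 p hp with h | h
        · exact i1 _ (hsv _ (List.dropLast_subset _ h))
        · exact h
      have hinv' : ∀ p ∈ ((next_moves (stack.getLastD (0, 0)) safety visited).foldl pvPushA
          (visited, stack.dropLast)).1,
          p ∈ ((next_moves (stack.getLastD (0, 0)) safety visited).foldl pvPushA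
            (visited, stack.dropLast)).2 ∨ ∀ q,
            pvEdge safety safety.length (safety.headD []).length p q →
              q ∈ ((next_moves (stack.getLastD (0, 0)) safety visited).foldl pvPushA
                (visited, stack.dropLast)).1 := by
        intro p hp
        rcases i4 p hp with hpv | hps
        · rcases hinv p hpv with hpstack | hclosed
          · rcases hmemstack p hpstack with h | h
            · exact Or.inl (i3 _ h)
            · subst h
              refine Or.inr (fun q hq => ?_)
              by_cases hqv : q ∈ visited
              · exact i1 _ hqv
              · exact i2 _ (mem_next_moves.mpr ⟨hq, hqv⟩)
          · exact Or.inr (fun q hq => i1 _ (hclosed q hq))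
        · exact Or.inl hps
      obtain ⟨j1, j2⟩ := ih _ _ hfuel' hsv' hinv'
      exact ⟨fun p hp => j1 _ (i1 _ hp), j2⟩

lemma dfs_spec (safety : List (List Int)) (V : PySem.Set (Int × Int))
    (S : List (Int × Int)) (r c : Int)
    (h : ∀ p, p ∈ V ↔ pvReach safety safety.length (safety.headD []).length S p) :
    ∀ p, p ∈ dfs r c safety V ↔
      pvReach safety safety.length (safety.headD []).length (S ++ [(r, c)]) p := by
  have hfuel : pvUc safety.length (safety.headD []).length (PySem.Set.add V (r, c)) +
      ([(r, c)] : List (Int × Int)).length ≤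
      safety.length * (safety.headD []).length + 1 := by
    have := pvUc_le safety.length (safety.headD []).length (PySem.Set.add V (r, c))
    simp only [List.length_cons, List.length_nil]
    omega
  have hsv : ∀ p ∈ ([(r, c)] : List (Int × Int)), p ∈ PySem.Set.add V (r, c) := by
    intro p hp
    rw [List.mem_singleton.mp hp]
    exact (PySem.Set.mem_add V (r, c) (r, c)).mpr (Or.inr rfl)
  have hinv : ∀ p ∈ PySem.Set.add V (r, c), p ∈ ([(r, c)] : List (Int × Int)) ∨ ∀ q,
      pvEdge safety safety.length (safety.headD []).length p q →
        q ∈ PySem.Set.add V (r, c) := by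
    intro p hp
    rcases (PySem.Set.mem_add V (r, c) p).mp hp with hpv | rfl
    · refine Or.inr (fun q hq => ?_)
      exact (PySem.Set.mem_add V (r, c) q).mpr
        (Or.inl ((h q).mpr (pvReach.step ((h p).mp hpv) hq)))
    · exact Or.inl (List.mem_singleton.mpr rfl)
  obtain ⟨j1, j2⟩ := dfsLoop_big safety (safety.length * (safety.headD []).length + 1)
    [(r, c)] (PySem.Set.add V (r, c)) hfuel hsv hinv
  intro p
  constructor
  · intro hp
    refine dfsLoop_sound safety (S ++ [(r, c)]) _ _ _ ?_ ?_ p hp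
    · intro z hz
      rcases (PySem.Set.mem_add V (r, c) z).mp hz with hzv | rfl
      · exact pvReach_mono (fun x hx => List.mem_append_left _ hx) ((h z).mp hzv)
      · exact pvReach.seed (List.mem_append_right _ (List.mem_singleton.mpr rfl))
    · intro z hz
      rw [List.mem_singleton.mp hz]
      exact pvReach.seed (List.mem_append_right _ (List.mem_singleton.mpr rfl))
  · intro hre
    refine pvReach_min ?_ ?_ hre
    · intro z hz
      rcases List.mem_append.mp hz with hzS | hzr
      · exact j1 _ ((PySem.Set.mem_add V (r, c) z).mpr (Or.inl ((h z).mpr (pvReach.seed hzS))))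
      · rw [List.mem_singleton.mp hzr]
        exact j1 _ ((PySem.Set.mem_add V (r, c) (r, c)).mpr (Or.inr rfl))
    · exact j2

lemma foldl_dfs (safety : List (List Int)) (f : Int → Int × Int) :
    ∀ (l : List Int) (V : PySem.Set (Int × Int)) (S : List (Int × Int)),
      (∀ p, p ∈ V ↔ pvReach safety safety.length (safety.headD []).length S p) →
      ∀ p, p ∈ l.foldl (fun v x => dfs (f x).1 (f x).2 safety v) V ↔
        pvReach safety safety.length (safety.headD []).length (S ++ l.map f) p := by
  intro l
  induction l with
  | nil =>
    intro V S h p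
    rw [List.foldl_nil, List.map_nil, List.append_nil]
    exact h p
  | cons x l ih =>
    intro V S h p
    rw [List.foldl_cons]
    have h1 := dfs_spec safety V S (f x).1 (f x).2 h
    have h2 := ih (dfs (f x).1 (f x).2 safety V) (S ++ [((f x).1, (f x).2)]) h1 p
    rw [h2, List.map_cons]
    rw [show S ++ [((f x).1, (f x).2)] ++ l.map f = S ++ (f x :: l.map f) by
      rw [List.append_assoc]; rfl]

-- unfolding equations for bfsLoop
lemma bfsLoop_nil (safety : List (List Int)) (m n : Nat) (fuel : Nat)
    (reach : PySem.Set (Int × Int)) : bfsLoop safety m n fuel reach [] = reach := by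
  cases fuel <;> rfl

lemma bfsLoop_zero_cons (safety : List (List Int)) (m n : Nat)
    (reach : PySem.Set (Int × Int)) (p0 : Int × Int) (F : List (Int × Int)) :
    bfsLoop safety m n 0 reach (p0 :: F) = reach := rfl

def pvPushB (safety : List (List Int)) (m n : Nat) (p : Int × Int)
    (rn : PySem.Set (Int × Int) × List (Int × Int)) (q : Int × Int) :
    PySem.Set (Int × Int) × List (Int × Int) :=
  if pvInb m n q && !(PySem.Set.contains rn.1 q)
      && decide (pvAt safety q.1 q.2 ≥ pvAt safety p.1 p.2)
  then (PySem.Set.add rn.1 q, rn.2 ++ [q]) else rn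

lemma bfsLoop_succ_cons (safety : List (List Int)) (m n : Nat) (f : Nat)
    (reach : PySem.Set (Int × Int)) (p0 : Int × Int) (F : List (Int × Int)) :
    bfsLoop safety m n (f + 1) reach (p0 :: F) =
      bfsLoop safety m n f
        ((p0 :: F).foldl (fun rn p => (pvNbrs p).foldl (pvPushB safety m n p) rn)
          (reach, ([] : List (Int × Int)))).1
        ((p0 :: F).foldl (fun rn p => (pvNbrs p).foldl (pvPushB safety m n p) rn)
          (reach, ([] : List (Int × Int)))).2 := rfl

lemma foldB_cell (safety : List (List Int)) (m n : Nat) (p : Int × Int) :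
    ∀ (L : List (Int × Int)) (rn : PySem.Set (Int × Int) × List (Int × Int)),
      (∀ q ∈ L, q ∈ pvNbrs p) →
      (∀ x ∈ rn.1, x ∈ (L.foldl (pvPushB safety m n p) rn).1) ∧
      (∀ x ∈ rn.2, x ∈ (L.foldl (pvPushB safety m n p) rn).2) ∧
      (∀ x ∈ (L.foldl (pvPushB safety m n p) rn).1,
        x ∈ rn.1 ∨ x ∈ (L.foldl (pvPushB safety m n p) rn).2) ∧
      (∀ x ∈ (L.foldl (pvPushB safety m n p) rn).2,
        x ∈ rn.2 ∨ pvEdge safety m n p x) ∧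
      (∀ x ∈ (L.foldl (pvPushB safety m n p) rn).2,
        x ∈ rn.2 ∨ x ∈ (L.foldl (pvPushB safety m n p) rn).1) ∧
      (∀ q ∈ L, pvEdge safety m n p q → q ∈ (L.foldl (pvPushB safety m n p) rn).1) ∧
      pvUc m n (L.foldl (pvPushB safety m n p) rn).1 +
        (L.foldl (pvPushB safety m n p) rn).2.length ≤
        pvUc m n rn.1 + rn.2.length := by
  intro L
  induction L with
  | nil =>
    intro rn _
    simp only [List.foldl_nil]
    refine ⟨fun x hx => hx, fun x hx => hx, fun x hx => Or.inl hx, fun x hx => Or.inl hx,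
      fun x hx => Or.inl hx, ?_, le_refl _⟩
    intro q hq; cases hq
  | cons q0 L ih =>
    intro rn hL
    rw [List.foldl_cons]
    have hq0nbr : q0 ∈ pvNbrs p := hL q0 (List.mem_cons_self ..)
    have hLtail : ∀ q ∈ L, q ∈ pvNbrs p := fun q hq => hL q (List.mem_cons_of_mem _ hq)
    by_cases hcond : (pvInb m n q0 && !(PySem.Set.contains rn.1 q0)
        && decide (pvAt safety q0.1 q0.2 ≥ pvAt safety p.1 p.2)) = true
    · rw [show pvPushB safety m n p rn q0 = (PySem.Set.add rn.1 q0, rn.2 ++ [q0]) from by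
        rw [pvPushB, if_pos hcond]]
      obtain ⟨hinb, hnc, hge⟩ : pvInb m n q0 = true ∧
          PySem.Set.contains rn.1 q0 = false ∧
          pvAt safety q0.1 q0.2 ≥ pvAt safety p.1 p.2 := by
        rcases Bool.and_eq_true_iff.mp hcond with ⟨h1, h3⟩
        rcases Bool.and_eq_true_iff.mp h1 with ⟨ha, hb⟩
        exact ⟨ha, by simpa using hb, by simpa using h3⟩
      have hq0edge : pvEdge safety m n p q0 := ⟨hq0nbr, hinb, by simpa using hge⟩
      have hq0new : q0 ∉ rn.1 := by
        intro hmem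
        rw [(PySem.Set.contains_iff rn.1 q0).mpr hmem] at hnc
        cases hnc
      obtain ⟨i1, i2, i3, i4, i5, i6, i7⟩ := ih (PySem.Set.add rn.1 q0, rn.2 ++ [q0]) hLtail
      have hq0add : q0 ∈ PySem.Set.add rn.1 q0 := (PySem.Set.mem_add rn.1 q0 q0).mpr (Or.inr rfl)
      have hq0s : q0 ∈ rn.2 ++ [q0] := List.mem_append_right _ (List.mem_singleton.mpr rfl)
      refine ⟨?_, ?_, ?_, ?_, ?_, ?_, ?_⟩
      · exact fun x hx => i1 _ ((PySem.Set.mem_add rn.1 q0 x).mpr (Or.inl hx))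
      · exact fun x hx => i2 _ (List.mem_append_left _ hx)
      · intro x hx
        rcases i3 x hx with h | h
        · rcases (PySem.Set.mem_add rn.1 q0 x).mp h with h' | rfl
          · exact Or.inl h'
          · exact Or.inr (i2 _ hq0s)
        · exact Or.inr h
      · intro x hx
        rcases i4 x hx with h | h
        · rcases List.mem_append.mp h with h' | h'
          · exact Or.inl h'
          · rw [List.mem_singleton.mp h']
            exact Or.inr hq0edge
        · exact Or.inr h
      · intro x hx
        rcases i5 x hx with h | h
        · rcases List.mem_append.mp h with h' | h'
          · exact Or.inl h'
          · exact Or.inr (i1 _ (by rw [List.mem_singleton.mp h']; exact hq0add))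
        · exact Or.inr h
      · intro q hq hedge
        rcases List.mem_cons.mp hq with rfl | hq'
        · exact i1 _ hq0add
        · exact i6 _ hq' hedge
      · have hlt : pvUc m n (PySem.Set.add rn.1 q0) < pvUc m n rn.1 :=
          pvUc_add_lt m n rn.1 q0 hinb hq0new
        have := i7
        simp only [List.length_append, List.length_singleton] at this ⊢
        omega
    · rw [show pvPushB safety m n p rn q0 = rn from by rw [pvPushB, if_neg hcond]]
      obtain ⟨i1, i2, i3, i4, i5, i6, i7⟩ := ih rn hLtail
      refine ⟨i1, i2, i3, i4, i5, ?_, i7⟩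
      intro q hq hedge
      rcases List.mem_cons.mp hq with rfl | hq'
      · -- the guard failed though the move is legal: q was already in the set
        have hmem : q ∈ rn.1 := by
          by_contra hnot
          apply hcond
          have h1 : pvInb m n q = true := hedge.2.1
          have h2 : PySem.Set.contains rn.1 q = false := by
            rw [pvContains_eq_decide]; exact decide_eq_false hnot
          have h3 : decide (pvAt safety q.1 q.2 ≥ pvAt safety p.1 p.2) = true :=
            decide_eq_true hedge.2.2
          rw [h1, h2, h3]
          rfl
        exact i1 _ hmem
      · exact i6 _ hq' hedge

lemma foldB_front (safety : List (List Int)) (m n : Nat) :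
    ∀ (F : List (Int × Int)) (rn : PySem.Set (Int × Int) × List (Int × Int)),
      (∀ x ∈ rn.1, x ∈ (F.foldl (fun rn p => (pvNbrs p).foldl (pvPushB safety m n p) rn) rn).1) ∧
      (∀ x ∈ rn.2, x ∈ (F.foldl (fun rn p => (pvNbrs p).foldl (pvPushB safety m n p) rn) rn).2) ∧
      (∀ x ∈ (F.foldl (fun rn p => (pvNbrs p).foldl (pvPushB safety m n p) rn) rn).1,
        x ∈ rn.1 ∨ x ∈ (F.foldl (fun rn p => (pvNbrs p).foldl (pvPushB safety m n p) rn) rn).2) ∧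
      (∀ x ∈ (F.foldl (fun rn p => (pvNbrs p).foldl (pvPushB safety m n p) rn) rn).2,
        x ∈ rn.2 ∨ ∃ p ∈ F, pvEdge safety m n p x) ∧
      (∀ x ∈ (F.foldl (fun rn p => (pvNbrs p).foldl (pvPushB safety m n p) rn) rn).2,
        x ∈ rn.2 ∨ x ∈ (F.foldl (fun rn p => (pvNbrs p).foldl (pvPushB safety m n p) rn) rn).1) ∧
      (∀ p ∈ F, ∀ q, pvEdge safety m n p q →
        q ∈ (F.foldl (fun rn p => (pvNbrs p).foldl (pvPushB safety m n p) rn) rn).1) ∧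
      pvUc m n (F.foldl (fun rn p => (pvNbrs p).foldl (pvPushB safety m n p) rn) rn).1 +
        (F.foldl (fun rn p => (pvNbrs p).foldl (pvPushB safety m n p) rn) rn).2.length ≤
        pvUc m n rn.1 + rn.2.length := by
  intro F
  induction F with
  | nil =>
    intro rn
    simp only [List.foldl_nil]
    refine ⟨fun x hx => hx, fun x hx => hx, fun x hx => Or.inl hx, fun x hx => Or.inl hx,
      fun x hx => Or.inl hx, ?_, le_refl _⟩
    intro p hp; cases hp
  | cons p0 F ih =>
    intro rn
    rw [List.foldl_cons]
    obtain ⟨c1, c2, c3, c4, c5, c6, c7⟩ :=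
      foldB_cell safety m n p0 (pvNbrs p0) rn (fun q hq => hq)
    obtain ⟨i1, i2, i3, i4, i5, i6, i7⟩ := ih ((pvNbrs p0).foldl (pvPushB safety m n p0) rn)
    refine ⟨fun x hx => i1 _ (c1 _ hx), fun x hx => i2 _ (c2 _ hx), ?_, ?_, ?_, ?_, ?_⟩
    · intro x hx
      rcases i3 x hx with h | h
      · rcases c3 x h with h' | h'
        · exact Or.inl h'
        · exact Or.inr (i2 _ h')
      · exact Or.inr h
    · intro x hx
      rcases i4 x hx with h | h
      · rcases c4 x h with h' | h'
        · exact Or.inl h'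
        · exact Or.inr ⟨p0, List.mem_cons_self .., h'⟩
      · rcases h with ⟨p, hp, hedge⟩
        exact Or.inr ⟨p, List.mem_cons_of_mem _ hp, hedge⟩
    · intro x hx
      rcases i5 x hx with h | h
      · rcases c5 x h with h' | h'
        · exact Or.inl h'
        · exact Or.inr (i1 _ h')
      · exact Or.inr h
    · intro p hp q hq
      rcases List.mem_cons.mp hp with rfl | hp'
      · exact i1 _ (c6 q hq.1 hq)
      · exact i6 _ hp' q hq
    · omega

lemma bfsLoop_sound (safety : List (List Int)) (m n : Nat) (S : List (Int × Int)) :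
    ∀ (fuel : Nat) (reach : PySem.Set (Int × Int)) (frontier : List (Int × Int)),
      (∀ p ∈ reach, pvReach safety m n S p) →
      (∀ p ∈ frontier, pvReach safety m n S p) →
      ∀ p ∈ bfsLoop safety m n fuel reach frontier, pvReach safety m n S p := by
  intro fuel
  induction fuel with
  | zero =>
    intro reach frontier hr _ p hp
    cases frontier with
    | nil => rw [bfsLoop_nil] at hp; exact hr p hp
    | cons a F => rw [bfsLoop_zero_cons] at hp; exact hr p hp
  | succ f ih =>
    intro reach frontier hr hf p hp
    cases frontier with
    | nil => rw [bfsLoop_nil] at hp; exact hr p hp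
    | cons p0 F =>
      rw [bfsLoop_succ_cons] at hp
      obtain ⟨i1, i2, i3, i4, i5, i6, i7⟩ := foldB_front safety m n (p0 :: F) (reach, [])
      have hr2 : ∀ z ∈ ((p0 :: F).foldl (fun rn p => (pvNbrs p).foldl (pvPushB safety m n p) rn)
          (reach, ([] : List (Int × Int)))).2, pvReach safety m n S z := by
        intro z hz
        rcases i4 z hz with h | h
        · cases h
        · rcases h with ⟨p', hp', hedge⟩
          exact pvReach.step (hf p' hp') hedge
      have hr1 : ∀ z ∈ ((p0 :: F).foldl (fun rn p => (pvNbrs p).foldl (pvPushB safety m n p) rn)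
          (reach, ([] : List (Int × Int)))).1, pvReach safety m n S z := by
        intro z hz
        rcases i3 z hz with h | h
        · exact hr z h
        · exact hr2 z h
      exact ih _ _ hr1 hr2 p hp

lemma bfsLoop_big (safety : List (List Int)) (m n : Nat) :
    ∀ (fuel : Nat) (reach : PySem.Set (Int × Int)) (frontier : List (Int × Int)),
      pvUc m n reach + frontier.length ≤ fuel →
      (∀ p ∈ frontier, p ∈ reach) →
      (∀ p ∈ reach, p ∈ frontier ∨ ∀ q, pvEdge safety m n p q → q ∈ reach) →
      (∀ p ∈ reach, p ∈ bfsLoop safety m n fuel reach frontier) ∧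
      (∀ p ∈ bfsLoop safety m n fuel reach frontier, ∀ q, pvEdge safety m n p q →
        q ∈ bfsLoop safety m n fuel reach frontier) := by
  intro fuel
  induction fuel with
  | zero =>
    intro reach frontier hfuel hfr hinv
    cases frontier with
    | nil =>
      rw [bfsLoop_nil]
      refine ⟨fun p hp => hp, fun p hp q hq => ?_⟩
      rcases hinv p hp with h | h
      · cases h
      · exact h q hq
    | cons a F => simp only [List.length_cons] at hfuel; omega
  | succ f ih =>
    intro reach frontier hfuel hfr hinv
    cases frontier with
    | nil =>
      rw [bfsLoop_nil]
      refine ⟨fun p hp => hp, fun p hp q hq => ?_⟩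
      rcases hinv p hp with h | h
      · cases h
      · exact h q hq
    | cons p0 F =>
      rw [bfsLoop_succ_cons]
      obtain ⟨i1, i2, i3, i4, i5, i6, i7⟩ := foldB_front safety m n (p0 :: F) (reach, [])
      have hfuel' : pvUc m n ((p0 :: F).foldl
          (fun rn p => (pvNbrs p).foldl (pvPushB safety m n p) rn)
          (reach, ([] : List (Int × Int)))).1 +
          ((p0 :: F).foldl (fun rn p => (pvNbrs p).foldl (pvPushB safety m n p) rn)
            (reach, ([] : List (Int × Int)))).2.length ≤ f := by
        simp only [List.length_cons] at hfuel
        simp only [List.length_nil] at i7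
        omega
      have hfr' : ∀ p ∈ ((p0 :: F).foldl (fun rn p => (pvNbrs p).foldl (pvPushB safety m n p) rn)
          (reach, ([] : List (Int × Int)))).2,
          p ∈ ((p0 :: F).foldl (fun rn p => (pvNbrs p).foldl (pvPushB safety m n p) rn)
            (reach, ([] : List (Int × Int)))).1 := by
        intro p hp
        rcases i5 p hp with h | h
        · cases h
        · exact h
      have hinv' : ∀ p ∈ ((p0 :: F).foldl (fun rn p => (pvNbrs p).foldl (pvPushB safety m n p) rn)
          (reach, ([] : List (Int × Int)))).1,
          p ∈ ((p0 :: F).foldl (fun rn p => (pvNbrs p).foldl (pvPushB safety m n p) rn)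
            (reach, ([] : List (Int × Int)))).2 ∨ ∀ q, pvEdge safety m n p q →
            q ∈ ((p0 :: F).foldl (fun rn p => (pvNbrs p).foldl (pvPushB safety m n p) rn)
              (reach, ([] : List (Int × Int)))).1 := by
        intro p hp
        rcases i3 p hp with hpr | hps
        · rcases hinv p hpr with hpf | hclosed
          · exact Or.inr (fun q hq => i6 p hpf q hq)
          · exact Or.inr (fun q hq => i1 _ (hclosed q hq))
        · exact Or.inl hps
      obtain ⟨j1, j2⟩ := ih _ _ hfuel' hfr' hinv'
      exact ⟨fun p hp => j1 _ (i1 _ hp), j2⟩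

lemma flood_spec (safety : List (List Int)) (seeds : List (Int × Int)) :
    ∀ p, p ∈ flood safety safety.length (safety.headD []).length seeds ↔
      pvReach safety safety.length (safety.headD []).length seeds p := by
  have hfuel : pvUc safety.length (safety.headD []).length (PySem.Set.ofList seeds) +
      seeds.length ≤ safety.length * (safety.headD []).length + seeds.length := by
    have := pvUc_le safety.length (safety.headD []).length (PySem.Set.ofList seeds)
    omega
  have hfr : ∀ p ∈ seeds, p ∈ PySem.Set.ofList seeds :=
    fun p hp => (PySem.Set.mem_ofList seeds p).mpr hp
  have hinv : ∀ p ∈ PySem.Set.ofList seeds, p ∈ seeds ∨ ∀ q,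
      pvEdge safety safety.length (safety.headD []).length p q →
        q ∈ PySem.Set.ofList seeds :=
    fun p hp => Or.inl ((PySem.Set.mem_ofList seeds p).mp hp)
  obtain ⟨j1, j2⟩ := bfsLoop_big safety safety.length (safety.headD []).length
    (safety.length * (safety.headD []).length + seeds.length)
    (PySem.Set.ofList seeds) seeds hfuel hfr hinv
  intro p
  constructor
  · intro hp
    refine bfsLoop_sound safety safety.length (safety.headD []).length seeds _ _ _ ?_ ?_ p hp
    · exact fun z hz => pvReach.seed ((PySem.Set.mem_ofList seeds z).mp hz)
    · exact fun z hz => pvReach.seed hz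
  · intro hre
    exact pvReach_min (fun z hz => j1 _ (hfr z hz)) j2 hre

-- the two final row-major scans agree when the sets agree pointwise
lemma scan_eq (m n : Nat) (l1 r1 l2 r2 : PySem.Set (Int × Int))
    (hl : ∀ p, p ∈ l1 ↔ p ∈ l2) (hr : ∀ p, p ∈ r1 ↔ p ∈ r2) :
    (PySem.List.pyRange 0 (m : Int)).foldl (fun result r =>
      (PySem.List.pyRange 0 (n : Int)).foldl (fun result c =>
        if PySem.Set.contains l1 (r, c) && PySem.Set.contains r1 (r, c)
        then result ++ [(r, c)] else result) result) []
    = (PySem.List.pyRange 0 (m : Int)).flatMap (fun r =>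
      ((PySem.List.pyRange 0 (n : Int)).filter (fun c =>
        PySem.Set.contains l2 (r, c) && PySem.Set.contains r2 (r, c))).map (fun c => (r, c))) := by
  have hc : ∀ rc : Int × Int,
      (PySem.Set.contains l1 rc && PySem.Set.contains r1 rc)
        = (PySem.Set.contains l2 rc && PySem.Set.contains r2 rc) := by
    intro rc
    rw [pvContains_eq_decide l1 rc, pvContains_eq_decide l2 rc,
      pvContains_eq_decide r1 rc, pvContains_eq_decide r2 rc,
      decide_eq_decide.mpr (hl rc), decide_eq_decide.mpr (hr rc)]
  simp only [PySem.List.foldl_append_if]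
  simp only [PySem.List.foldl_append_eq_flatMap, List.nil_append]
  have hfun : ∀ r : Int, (fun c : Int => PySem.Set.contains l1 (r, c) && PySem.Set.contains r1 (r, c))
      = (fun c : Int => PySem.Set.contains l2 (r, c) && PySem.Set.contains r2 (r, c)) :=
    fun r => funext (fun c => hc (r, c))
  rw [show (fun r : Int => ((PySem.List.pyRange 0 (n : Int)).filter
      (fun c => PySem.Set.contains l1 (r, c) && PySem.Set.contains r1 (r, c))).map
        (fun c => (r, c)))
    = (fun r : Int => ((PySem.List.pyRange 0 (n : Int)).filter
      (fun c => PySem.Set.contains l2 (r, c) && PySem.Set.contains r2 (r, c))).map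
        (fun c => (r, c))) from funext (fun r => by rw [hfun r])]

-- ===== VERDICT (by name: the statement is the Claim_ definition above) =====
theorem escape_subzones_spec : Claim_equal_escape_subzones := by
  intro safety _ _
  unfold Spec_escape_subzones
  have base : ∀ p, p ∈ (PySem.Set.empty : PySem.Set (Int × Int)) ↔
      pvReach safety safety.length (safety.headD []).length [] p :=
    fun p => Iff.intro (fun h => (List.not_mem_nil h).elim) (fun h => (pvReach_nil h).elim)
  -- A's left set
  have hA1 := foldl_dfs safety (fun r => (r, (0 : Int)))
    (PySem.List.pyRange 0 (safety.length : Int)) PySem.Set.empty [] base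
  have hA2 := foldl_dfs safety (fun c => ((0 : Int), c))
    (PySem.List.pyRange 0 (((safety.headD []).length : Nat) : Int)) _ _ hA1
  -- A's right set
  have hB1 := foldl_dfs safety (fun r => (r, ((safety.headD []).length : Int) - 1))
    (PySem.List.pyRange 0 (safety.length : Int)) PySem.Set.empty [] base
  have hB2 := foldl_dfs safety (fun c => ((safety.length : Int) - 1, c))
    (PySem.List.pyRange 0 (((safety.headD []).length : Nat) : Int)) _ _ hB1
  -- B's sets
  have hFL := flood_spec safety
    ((PySem.List.pyRange 0 (safety.length : Int)).map (fun r => (r, (0 : Int))) ++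
     (PySem.List.pyRange 0 (((safety.headD []).length : Nat) : Int)).map (fun c => ((0 : Int), c)))
  have hFR := flood_spec safety
    ((PySem.List.pyRange 0 (safety.length : Int)).map
        (fun r => (r, ((safety.headD []).length : Int) - 1)) ++
     (PySem.List.pyRange 0 (((safety.headD []).length : Nat) : Int)).map
        (fun c => ((safety.length : Int) - 1, c)))
  have hl : ∀ p, p ∈ (PySem.List.pyRange 0 (((safety.headD []).length : Nat) : Int)).foldl
      (fun v x => dfs ((fun c => ((0 : Int), c)) x).1 ((fun c => ((0 : Int), c)) x).2 safety v)
      ((PySem.List.pyRange 0 (safety.length : Int)).foldl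
        (fun v x => dfs ((fun r => (r, (0 : Int))) x).1 ((fun r => (r, (0 : Int))) x).2 safety v)
        PySem.Set.empty) ↔
      p ∈ flood safety safety.length (safety.headD []).length
        ((PySem.List.pyRange 0 (safety.length : Int)).map (fun r => (r, (0 : Int))) ++
         (PySem.List.pyRange 0 (((safety.headD []).length : Nat) : Int)).map
           (fun c => ((0 : Int), c))) := by
    intro p
    rw [hA2 p, hFL p]
    rw [show ([] ++ (PySem.List.pyRange 0 (safety.length : Int)).map (fun r => (r, (0 : Int)))) ++
        (PySem.List.pyRange 0 (((safety.headD []).length : Nat) : Int)).map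
          (fun c => ((0 : Int), c))
      = (PySem.List.pyRange 0 (safety.length : Int)).map (fun r => (r, (0 : Int))) ++
        (PySem.List.pyRange 0 (((safety.headD []).length : Nat) : Int)).map
          (fun c => ((0 : Int), c)) from by rw [List.nil_append]]
  have hr : ∀ p, p ∈ (PySem.List.pyRange 0 (((safety.headD []).length : Nat) : Int)).foldl
      (fun v x => dfs ((fun c => (((safety.length : Int) - 1), c)) x).1
        ((fun c => (((safety.length : Int) - 1), c)) x).2 safety v)
      ((PySem.List.pyRange 0 (safety.length : Int)).foldl
        (fun v x => dfs ((fun r => (r, ((safety.headD []).length : Int) - 1)) x).1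
          ((fun r => (r, ((safety.headD []).length : Int) - 1)) x).2 safety v)
        PySem.Set.empty) ↔
      p ∈ flood safety safety.length (safety.headD []).length
        ((PySem.List.pyRange 0 (safety.length : Int)).map
            (fun r => (r, ((safety.headD []).length : Int) - 1)) ++
         (PySem.List.pyRange 0 (((safety.headD []).length : Nat) : Int)).map
           (fun c => ((safety.length : Int) - 1, c))) := by
    intro p
    rw [hB2 p, hFR p]
    rw [List.nil_append]
  show escape_subzones safety = escape_subzones_alt safety
  have hsplit1 := PySem.List.foldl_prod_mk
    (f := fun v (r : Int) => dfs r 0 safety v)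
    (g := fun v (r : Int) => dfs r (((safety.headD []).length : Int) - 1) safety v)
    (PySem.List.pyRange 0 (safety.length : Int))
    (PySem.Set.empty : PySem.Set (Int × Int)) (PySem.Set.empty : PySem.Set (Int × Int))
  have hsplit2 := PySem.List.foldl_prod_mk
    (f := fun v (c : Int) => dfs 0 c safety v)
    (g := fun v (c : Int) => dfs (((safety.length : Int)) - 1) c safety v)
    (PySem.List.pyRange 0 (((safety.headD []).length : Nat) : Int))
    ((PySem.List.pyRange 0 (safety.length : Int)).foldl
      (fun v (r : Int) => dfs r 0 safety v) (PySem.Set.empty : PySem.Set (Int × Int)))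
    ((PySem.List.pyRange 0 (safety.length : Int)).foldl
      (fun v (r : Int) => dfs r (((safety.headD []).length : Int) - 1) safety v)
      (PySem.Set.empty : PySem.Set (Int × Int)))
  simp only [escape_subzones, escape_subzones_alt]
  rw [hsplit1, hsplit2]
  exact scan_eq safety.length (safety.headD []).length _ _ _ _ hl hr
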